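-- pv_equiv track=rewrite | github.com/Traze5/neuroinformatica | 2.py | check_dir
-- ===== SOURCE A (Python) =====
-- def check_dir(direccion):
--     cl = cd = 0
--     td = False
--     ant = " "
--
--     for car in direccion:
--         if car in " .":
--             if cl == cd:
--                 td = True
--             cl = cd = 0
--             ant = ""
--         else:
--             cl += 1
--             if not car.isdigit() and not car.isalpha():
--                 return False
--             if ant.isupper() and car.isupper():
--                 return False
--
--             if car.isdigit():
--                 cd += 1
--             ant = car
--     return True
-- ===== SOURCE B (Python) =====
-- def check_dir(direccion):
--     ok_chars = all(c.isdigit() or c.isalpha() or c in " ." for c in direccion)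
--     no_double_upper = all(not (a.isupper() and b.isupper())
--                           for a, b in zip(direccion, direccion[1:]))
--     return ok_chars and no_double_upper
-- ===== Notes on version B (the rewrite author's own statement) =====
-- stated objective: simpler
-- what changed: Replaces A's stateful single-pass scan with early returns and dead cl/cd/td counters by two declarative whole-string checks: every character is a digit, a letter or a separator (space/dot), and no two adjacent characters are both uppercase.
import Mathlib
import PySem

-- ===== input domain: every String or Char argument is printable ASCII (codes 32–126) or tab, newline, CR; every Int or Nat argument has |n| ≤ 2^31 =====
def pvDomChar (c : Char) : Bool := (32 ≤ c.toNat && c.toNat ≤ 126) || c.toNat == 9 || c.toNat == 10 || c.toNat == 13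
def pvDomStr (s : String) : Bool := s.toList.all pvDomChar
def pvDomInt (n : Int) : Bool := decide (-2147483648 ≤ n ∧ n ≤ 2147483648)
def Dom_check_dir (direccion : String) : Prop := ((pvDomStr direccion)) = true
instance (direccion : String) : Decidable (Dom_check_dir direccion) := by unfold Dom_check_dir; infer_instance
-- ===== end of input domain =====

-- B replaces A's stateful single-pass scan (with its dead td/cl/cd counters) by two plain
-- whole-string checks: every char is digit/alpha/separator, and no two adjacent chars are
-- both uppercase (objective: simpler; not claimed faster).

-- ===== PORT A =====
-- Python str.isupper, exact on ASCII: at least one cased (= alphabetic) char and no lowercase one.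
def pyStrIsupper (s : String) : Bool :=
  s.toList.any PySem.Chars.isalpha &&
  s.toList.all (fun c => !PySem.Chars.isalpha c || PySem.Chars.isupper c)

def checkDirAux : List Char → Int → Int → Bool → String → Bool
  | [], _, _, _, _ => true
  | c :: rest, cl, cd, td, ant =>
    if c = ' ' ∨ c = '.' then
      checkDirAux rest 0 0 (if cl = cd then true else td) ""
    else
      if !PySem.Chars.isdigit c && !PySem.Chars.isalpha c then false
      else if pyStrIsupper ant && PySem.Chars.isupper c then false
      else
        checkDirAux rest (cl + 1) (if PySem.Chars.isdigit c then cd + 1 else cd) td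
          (String.ofList [c])

def check_dir (direccion : String) : Bool :=
  checkDirAux direccion.toList 0 0 false " "

-- ===== PORT B =====
def check_dir_alt (direccion : String) : Bool :=
  let l := direccion.toList
  (l.all fun c => PySem.Chars.isdigit c || PySem.Chars.isalpha c || c == ' ' || c == '.') &&
  ((l.zip l.tail).all fun p => !(PySem.Chars.isupper p.1 && PySem.Chars.isupper p.2))

-- ===== PRECONDITION & SPEC =====
def Spec_check_dir (direccion : String) (out : Bool) : Prop := out = check_dir_alt direccion
instance (direccion : String) (out : Bool) : Decidable (Spec_check_dir direccion out) := by unfold Spec_check_dir; infer_instance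

-- ===== CLAIM (what is proved, stated in full; the proofs are below) =====
def Claim_equal_check_dir : Prop := ∀ (direccion : String), Dom_check_dir direccion → Spec_check_dir direccion (check_dir direccion)

-- ===== LEMMAS AND PROOFS =====

def pvOkChar (c : Char) : Bool :=
  PySem.Chars.isdigit c || PySem.Chars.isalpha c || c == ' ' || c == '.'

def pvPairsOk (l : List Char) : Bool :=
  (l.zip l.tail).all fun p => !(PySem.Chars.isupper p.1 && PySem.Chars.isupper p.2)

def pvHeadUp : List Char → Bool
  | [] => false
  | c :: _ => PySem.Chars.isupper c

lemma pv_upper_alpha (c : Char) (h : PySem.Chars.isupper c = true) :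
    PySem.Chars.isalpha c = true := by
  simp [PySem.Chars.isalpha]
  exact Or.inl h

lemma pv_strIsupper_single (c : Char) :
    pyStrIsupper (String.ofList [c]) = PySem.Chars.isupper c := by
  have hua : PySem.Chars.isupper c = true → PySem.Chars.isalpha c = true := pv_upper_alpha c
  cases ha : PySem.Chars.isalpha c <;> cases hu : PySem.Chars.isupper c <;>
    simp_all [pyStrIsupper]

lemma pv_pairsOk_cons (c : Char) (l : List Char) :
    pvPairsOk (c :: l) = (!(PySem.Chars.isupper c && pvHeadUp l) && pvPairsOk l) := by
  cases l with
  | nil => simp [pvPairsOk, pvHeadUp]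
  | cons d r => simp [pvPairsOk, pvHeadUp]

lemma pv_aux_eq (l : List Char) (cl cd : Int) (td : Bool) (ant : String) :
    checkDirAux l cl cd td ant =
      (l.all pvOkChar && pvPairsOk l && !(pyStrIsupper ant && pvHeadUp l)) := by
  induction l generalizing cl cd td ant with
  | nil => simp [checkDirAux, pvPairsOk, pvHeadUp]
  | cons c rest ih =>
    by_cases hsep : c = ' ' ∨ c = '.'
    · have hup : PySem.Chars.isupper c = false := by
        rcases hsep with h | h <;> subst h <;> decide
      have hok : pvOkChar c = true := by
        rcases hsep with h | h <;> subst h <;> decide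
      simp only [checkDirAux, if_pos hsep, ih, pv_pairsOk_cons, pvHeadUp, List.all_cons]
      simp [hup, hok, pyStrIsupper]
    · have h1 : (c == ' ') = false := by
        simp; intro h; exact hsep (Or.inl h)
      have h2 : (c == '.') = false := by
        simp; intro h; exact hsep (Or.inr h)
      simp only [checkDirAux, if_neg hsep]
      split_ifs with hda hau hdig
      · simp only [Bool.and_eq_true, Bool.not_eq_true'] at hda
        simp [pvOkChar, h1, h2, hda.1, hda.2]
      · simp only [Bool.and_eq_true] at hau
        have ha : PySem.Chars.isalpha c = true := pv_upper_alpha c hau.2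
        simp [pvHeadUp, pvOkChar, hau.1, hau.2, ha, pv_pairsOk_cons]
      · have hokc : pvOkChar c = true := by
          simp only [Bool.and_eq_true, Bool.not_eq_true'] at hda
          simp only [pvOkChar, h1, h2, Bool.or_false]
          cases hdd : PySem.Chars.isdigit c
          · cases haa : PySem.Chars.isalpha c
            · exact absurd ⟨hdd, haa⟩ hda
            · simp
          · simp
        rw [ih, pv_strIsupper_single, pv_pairsOk_cons, List.all_cons, hokc]
        cases hA : rest.all pvOkChar <;> cases hP : pvPairsOk rest <;>
          cases hH : pvHeadUp rest <;> cases hS : pyStrIsupper ant <;>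
          cases hU : PySem.Chars.isupper c <;> simp_all [pvHeadUp]
      · have hokc : pvOkChar c = true := by
          simp only [Bool.and_eq_true, Bool.not_eq_true'] at hda
          simp only [pvOkChar, h1, h2, Bool.or_false]
          cases hdd : PySem.Chars.isdigit c
          · cases haa : PySem.Chars.isalpha c
            · exact absurd ⟨hdd, haa⟩ hda
            · simp
          · simp
        rw [ih, pv_strIsupper_single, pv_pairsOk_cons, List.all_cons, hokc]
        cases hA : rest.all pvOkChar <;> cases hP : pvPairsOk rest <;>
          cases hH : pvHeadUp rest <;> cases hS : pyStrIsupper ant <;>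
          cases hU : PySem.Chars.isupper c <;> simp_all [pvHeadUp]

-- ===== VERDICT (by name: the statement is the Claim_ definition above) =====
theorem check_dir_spec : Claim_equal_check_dir := by
  intro s _
  unfold Spec_check_dir check_dir
  have halt : check_dir_alt s = (s.toList.all pvOkChar && pvPairsOk s.toList) := rfl
  have hsp : pyStrIsupper " " = false := by decide
  rw [pv_aux_eq, halt]
  simp [hsp]
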